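-- pv_equiv track=rewrite | github.com/Suryatejaa/calcie | calcie_core/skills/app_access.py | _macos_app_candidates
-- ===== SOURCE A (Python) =====
-- def _macos_app_candidates(app_target: str):
--     candidates = []
--     raw = (app_target or "").strip()
--     if raw:
--         candidates.append(raw)
--
--     titled = raw.title()
--     if titled and titled not in candidates:
--         candidates.append(titled)
--
--     compact = raw.replace(" ", "")
--     if compact and compact not in candidates:
--         candidates.append(compact)
--
--     if raw.lower() == "voice memos":
--         for item in ["VoiceMemos", "Voice Memos"]:
--             if item not in candidates:
--                 candidates.append(item)
--
--     return candidates
-- ===== SOURCE B (Python) =====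
-- def _dedup(xs):
--     if not xs:
--         return []
--     head = xs[0]
--     return [head] + _dedup([x for x in xs[1:] if x != head])
--
--
-- def _macos_app_candidates(app_target: str):
--     raw = (app_target or "").strip()
--     base = [raw, raw.title(), raw.replace(" ", "")]
--     if raw.lower() == "voice memos":
--         base += ["VoiceMemos", "Voice Memos"]
--     return _dedup([s for s in base if s])
-- ===== Notes on version B (the rewrite author's own statement) =====
-- stated objective: alternative
-- what changed: B stages the work into separate passes: build the flat candidate list, filter out empty strings, then deduplicate by recursively taking the head and deleting its later copies from the remainder - no seen set, no membership tests against the output, no guarded appends.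
import Mathlib
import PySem

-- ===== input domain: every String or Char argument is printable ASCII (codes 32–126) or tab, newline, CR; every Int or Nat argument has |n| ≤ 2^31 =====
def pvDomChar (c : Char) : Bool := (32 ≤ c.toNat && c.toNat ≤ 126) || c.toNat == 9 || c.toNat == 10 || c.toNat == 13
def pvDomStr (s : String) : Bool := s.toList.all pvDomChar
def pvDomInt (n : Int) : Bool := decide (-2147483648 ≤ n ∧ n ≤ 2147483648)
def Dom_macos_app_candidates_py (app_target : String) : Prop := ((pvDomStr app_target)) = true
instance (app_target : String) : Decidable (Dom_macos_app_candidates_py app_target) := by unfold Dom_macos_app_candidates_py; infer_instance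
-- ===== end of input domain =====

-- B stages the work: flat candidate list, a filter pass dropping empties, then a recursive
-- take-head-and-delete-its-later-copies dedup (objective: alternative); same return value as A.

-- str.title(), ported by hand (exact on ASCII: a letter is uppercased unless the
-- previous character is a letter, in which case it is lowercased; non-letters pass through).
def pyTitleAux : Bool → List Char → List Char
  | _, [] => []
  | prev, ch :: rest =>
    let a := PySem.Chars.isalpha ch
    (if a then (if prev then PySem.Chars.lowerChar ch else PySem.Chars.upperChar ch) else ch)
      :: pyTitleAux a rest

def pyTitle (s : String) : String := String.ofList (pyTitleAux false s.toList)

-- ===== PORT A =====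
def macos_app_candidates_py (app_target : String) : List String :=
  let raw := PySem.Str.strip (if app_target ≠ "" then app_target else "")
  let c0 : List String := if raw ≠ "" then [raw] else []
  let titled := pyTitle raw
  let c1 := if titled ≠ "" ∧ titled ∉ c0 then c0 ++ [titled] else c0
  let compact := PySem.Str.replace raw " " ""
  let c2 := if compact ≠ "" ∧ compact ∉ c1 then c1 ++ [compact] else c1
  if PySem.Str.lower raw = "voice memos" then
    (["VoiceMemos", "Voice Memos"]).foldl
      (fun acc item => if item ∉ acc then acc ++ [item] else acc) c2
  else c2

-- ===== PORT B =====
-- recursive dedup: keep the head, delete its later copies, recurse on the rest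
def pvDedup : List String → List String
  | [] => []
  | h :: t => h :: pvDedup (t.filter (fun x => x ≠ h))
termination_by l => l.length
decreasing_by
  simp only [List.length_cons, List.length_unattach]
  exact Nat.lt_succ_of_le (le_trans (List.length_filter_le _ _) (by simp))

def macos_app_candidates_py_alt (app_target : String) : List String :=
  let raw := PySem.Str.strip (if app_target ≠ "" then app_target else "")
  let base := [raw, pyTitle raw, PySem.Str.replace raw " " ""] ++
    (if PySem.Str.lower raw = "voice memos" then ["VoiceMemos", "Voice Memos"] else [])
  pvDedup (base.filter (fun s => s ≠ ""))

-- ===== PRECONDITION & SPEC =====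
def Spec_macos_app_candidates_py (app_target : String) (out : List String) : Prop := out = macos_app_candidates_py_alt app_target
instance (app_target : String) (out : List String) : Decidable (Spec_macos_app_candidates_py app_target out) := by unfold Spec_macos_app_candidates_py; infer_instance

-- ===== CLAIM (what is proved, stated in full; the proofs are below) =====
def Claim_equal_macos_app_candidates_py : Prop := ∀ (app_target : String), Dom_macos_app_candidates_py app_target → Spec_macos_app_candidates_py app_target (macos_app_candidates_py app_target)

-- ===== LEMMAS AND PROOFS =====

-- A's guarded-append step, as a function (used only in the proof).
def pvAStep (acc : List String) (s : String) : List String :=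
  if s ≠ "" ∧ s ∉ acc then acc ++ [s] else acc

-- A's left fold of guarded appends equals B's filter-then-recursive-dedup.
theorem pvFoldDedup (xs : List String) : ∀ (acc : List String),
    xs.foldl pvAStep acc =
      acc ++ pvDedup (xs.filter (fun x => decide (x ≠ "" ∧ x ∉ acc))) := by
  induction xs with
  | nil => intro acc; rw [List.filter_nil, pvDedup]; simp
  | cons h t ih =>
    intro acc
    simp only [List.foldl_cons, List.filter_cons]
    by_cases hc : h ≠ "" ∧ h ∉ acc
    · rw [pvAStep, if_pos hc, ih]
      have : decide (h ≠ "" ∧ h ∉ acc) = true := by simp [hc.1, hc.2]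
      rw [this, if_pos rfl, pvDedup]
      conv_rhs => rw [List.append_cons]
      congr 1
      rw [List.filter_filter]
      congr 1
      apply List.filter_congr
      intro x _
      have hiff : (x ≠ "" ∧ x ∉ acc ++ [h]) ↔ (x ≠ h ∧ (x ≠ "" ∧ x ∉ acc)) := by
        simp only [List.mem_append, List.mem_singleton, not_or]
        tauto
      rw [decide_eq_decide.mpr hiff]
      · simp
      · infer_instance
    · rw [pvAStep, if_neg hc, ih]
      have : decide (h ≠ "" ∧ h ∉ acc) = false := by
        simpa using hc
      rw [this]
      simp

-- A's candidate chain, rewritten as the left fold of pvAStep over B's flat base list.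
theorem pvKey (raw : String) :
    (let c0 : List String := if raw ≠ "" then [raw] else []
     let c1 := if pyTitle raw ≠ "" ∧ pyTitle raw ∉ c0 then c0 ++ [pyTitle raw] else c0
     let c2 := if PySem.Str.replace raw " " "" ≠ "" ∧ PySem.Str.replace raw " " "" ∉ c1
        then c1 ++ [PySem.Str.replace raw " " ""] else c1
     if PySem.Str.lower raw = "voice memos" then
       (["VoiceMemos", "Voice Memos"]).foldl
         (fun acc item => if item ∉ acc then acc ++ [item] else acc) c2
     else c2) =
    ([raw, pyTitle raw, PySem.Str.replace raw " " ""] ++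
        (if PySem.Str.lower raw = "voice memos" then ["VoiceMemos", "Voice Memos"] else [])).foldl
      pvAStep [] := by
  simp only [List.foldl_append, List.foldl_cons, List.foldl_nil]
  have h0 : pvAStep [] raw = (if raw ≠ "" then [raw] else []) := by
    simp [pvAStep]
  rw [h0]
  set c0 : List String := if raw ≠ "" then [raw] else [] with hc0
  have h1 : pvAStep c0 (pyTitle raw) =
      (if pyTitle raw ≠ "" ∧ pyTitle raw ∉ c0 then c0 ++ [pyTitle raw] else c0) := rfl
  rw [h1]
  set c1 : List String :=
    if pyTitle raw ≠ "" ∧ pyTitle raw ∉ c0 then c0 ++ [pyTitle raw] else c0 with hc1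
  have h2 : pvAStep c1 (PySem.Str.replace raw " " "") =
      (if PySem.Str.replace raw " " "" ≠ "" ∧ PySem.Str.replace raw " " "" ∉ c1
        then c1 ++ [PySem.Str.replace raw " " ""] else c1) := rfl
  rw [h2]
  set c2 : List String :=
    if PySem.Str.replace raw " " "" ≠ "" ∧ PySem.Str.replace raw " " "" ∉ c1
      then c1 ++ [PySem.Str.replace raw " " ""] else c1 with hc2
  by_cases hv : PySem.Str.lower raw = "voice memos"
  · rw [if_pos hv, if_pos hv]
    have e1 : ¬("VoiceMemos" : String) = "" := by decide
    have e2 : ¬("Voice Memos" : String) = "" := by decide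
    simp only [List.foldl_cons, List.foldl_nil, pvAStep, ne_eq, e1, e2,
      not_false_eq_true, true_and]
  · rw [if_neg hv, if_neg hv]
    rfl

-- ===== VERDICT (by name: the statement is the Claim_ definition above) =====
theorem macos_app_candidates_py_spec : Claim_equal_macos_app_candidates_py := by
  intro a _
  show macos_app_candidates_py a = macos_app_candidates_py_alt a
  unfold macos_app_candidates_py macos_app_candidates_py_alt
  rw [pvKey, pvFoldDedup]
  simp
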